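-- pv_equiv track=rewrite | github.com/Chernandezz/Activlingo-backend | ai/multi_agent_analyzer.py | categorize_feedback_by_severity
-- ===== SOURCE A (Python) =====
-- from typing import List, Dict
--
-- def categorize_feedback_by_severity(feedback_list: List[Dict]) -> Dict[str, List[Dict]]:
--     categorized = {"high": [], "medium": [], "low": []}
--
--     for item in feedback_list:
--         severity = item.get("severity", "medium")
--         if severity in categorized:
--             categorized[severity].append(item)
--         else:
--             categorized["medium"].append(item)
--
--     return categorized
-- ===== SOURCE B (Python) =====
-- def categorize_feedback_by_severity(feedback_list):
--     def bucket(item):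
--         s = item.get("severity", "medium")
--         return s if s in ("high", "medium", "low") else "medium"
--     return {k: [item for item in feedback_list if bucket(item) == k]
--             for k in ("high", "medium", "low")}
-- ===== Notes on version B (the rewrite author's own statement) =====
-- stated objective: idiomatic
-- what changed: Replaces the single mutating grouping pass over a pre-seeded dict with a dict comprehension that builds each of the three buckets by its own filtering scan, using a severity-normalization helper so unknown severities land in medium.
import Mathlib
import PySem

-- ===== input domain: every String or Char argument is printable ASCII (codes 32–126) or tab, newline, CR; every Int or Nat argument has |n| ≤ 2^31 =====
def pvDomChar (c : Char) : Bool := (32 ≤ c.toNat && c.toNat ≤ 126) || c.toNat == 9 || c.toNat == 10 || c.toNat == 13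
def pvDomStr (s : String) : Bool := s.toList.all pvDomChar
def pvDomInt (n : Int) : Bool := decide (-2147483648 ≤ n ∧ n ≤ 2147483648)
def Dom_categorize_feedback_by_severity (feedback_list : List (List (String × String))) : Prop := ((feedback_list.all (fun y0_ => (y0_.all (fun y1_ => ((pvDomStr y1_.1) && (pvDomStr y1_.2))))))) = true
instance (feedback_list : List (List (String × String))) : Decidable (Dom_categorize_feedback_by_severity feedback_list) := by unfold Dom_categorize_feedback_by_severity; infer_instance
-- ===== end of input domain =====

-- B replaces A's single mutating pass over a pre-seeded dict by three independent filtering scans (one comprehension per bucket) with a severity-normalization helper; objective: more idiomatic.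

-- ===== PORT A =====
-- item.get("severity", "medium"): first-match lookup in the association list, default "medium"
def pvGetSeverity (item : List (String × String)) : String :=
  match item.find? (fun p => p.1 == "severity") with
  | some p => p.2
  | none => "medium"

-- one iteration of A's for-loop: membership test in the dict's keys, then append to that bucket (else "medium")
def pvStepA (cat : List (String × List (List (String × String)))) (item : List (String × String)) :
    List (String × List (List (String × String))) :=
  let severity := pvGetSeverity item
  let key := if cat.any (fun p => p.1 == severity) then severity else "medium"
  cat.map (fun p => if p.1 == key then (p.1, p.2 ++ [item]) else p)

def categorize_feedback_by_severity (feedback_list : List (List (String × String))) : List (String × List (List (String × String))) :=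
  feedback_list.foldl pvStepA [("high", []), ("medium", []), ("low", [])]

-- ===== PORT B =====
-- normalized bucket of an item: its severity if recognized, else "medium"
def pvBucket (item : List (String × String)) : String :=
  let s := pvGetSeverity item
  if s == "high" || s == "medium" || s == "low" then s else "medium"

def categorize_feedback_by_severity_alt (feedback_list : List (List (String × String))) : List (String × List (List (String × String))) :=
  ["high", "medium", "low"].map (fun k => (k, feedback_list.filter (fun item => pvBucket item == k)))

-- ===== PRECONDITION & SPEC =====
def Spec_categorize_feedback_by_severity (feedback_list : List (List (String × String))) (out : List (String × List (List (String × String)))) : Prop := out = categorize_feedback_by_severity_alt feedback_list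
instance (feedback_list : List (List (String × String))) (out : List (String × List (List (String × String)))) : Decidable (Spec_categorize_feedback_by_severity feedback_list out) := by unfold Spec_categorize_feedback_by_severity; infer_instance

-- ===== CLAIM (what is proved, stated in full; the proofs are below) =====
def Claim_equal_categorize_feedback_by_severity : Prop := ∀ (feedback_list : List (List (String × String))), Dom_categorize_feedback_by_severity feedback_list → Spec_categorize_feedback_by_severity feedback_list (categorize_feedback_by_severity feedback_list)

-- ===== LEMMAS AND PROOFS =====

-- loop invariant: folding A's step from any three-bucket state appends exactly B's filters
lemma foldA_inv (xs : List (List (String × String)))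
    (h m l : List (List (String × String))) :
    xs.foldl pvStepA [("high", h), ("medium", m), ("low", l)] =
      [("high", h ++ xs.filter (fun i => pvBucket i == "high")),
       ("medium", m ++ xs.filter (fun i => pvBucket i == "medium")),
       ("low", l ++ xs.filter (fun i => pvBucket i == "low"))] := by
  induction xs generalizing h m l with
  | nil => simp
  | cons x xs ih =>
    by_cases h1 : pvGetSeverity x = "high"
    · simp [List.foldl_cons, pvStepA, pvBucket, h1, ih]
    · by_cases h2 : pvGetSeverity x = "medium"
      · simp [List.foldl_cons, pvStepA, pvBucket, h2, ih]
      · by_cases h3 : pvGetSeverity x = "low"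
        · simp [List.foldl_cons, pvStepA, pvBucket, h3, ih]
        · simp [List.foldl_cons, pvStepA, pvBucket, h1, h2, h3, Ne.symm h1, Ne.symm h2, Ne.symm h3, ih]

-- ===== VERDICT (by name: the statement is the Claim_ definition above) =====
theorem categorize_feedback_by_severity_spec : Claim_equal_categorize_feedback_by_severity := by
  intro fl _
  unfold Spec_categorize_feedback_by_severity categorize_feedback_by_severity categorize_feedback_by_severity_alt
  simpa using foldA_inv fl [] [] []
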